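-- pv_equiv track=rewrite | github.com/rjejoon/291_mini_project2 | mini-project2/phase1/extractTermsFrom.py | filterTerms
-- ===== SOURCE A (Python) =====
-- def filterTerms(s: str) -> list:
--     '''
--     Extract alphanumeric terms that are at least 3 chars long from the given string.
--     '''
--     if len(s) <= 0:
--         return []
--
--     terms = []
--     start = 0
--     for end in range(len(s)):
--         if not s[end].isalnum():
--             if end - start >= 3:    # len of term must be larger than 3
--                 terms.append(s[start:end].lower())
--             start = end + 1
--
--     # the last term is not added if the last char is alphanumeric.
--     if s[end].isalnum():
--         if end - start >= 3:
--             terms.append(s[start:end+1].lower())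
--
--     return terms
-- ===== SOURCE B (Python) =====
-- def filterTerms(s: str) -> list:
--     terms = []
--     run = []
--     for ch in s:
--         if ch.isalnum():
--             run.append(ch)
--         else:
--             if len(run) >= 3:
--                 terms.append(''.join(run).lower())
--             run = []
--     if len(run) >= 3:
--         terms.append(''.join(run).lower())
--     return terms
-- ===== Notes on version B (the rewrite author's own statement) =====
-- stated objective: simpler
-- what changed: Replaced the start-index scan with slicing and a separate trailing re-check by a single uniform pass that accumulates the current alphanumeric run in a buffer and flushes it (loop body and once at the end) when it has length >= 3.
-- intended difference: On strings whose trailing maximal alphanumeric run has length exactly 3, A's off-by-one trailing flush (end - start >= 3, but that run's length is end-start+1) silently drops the final term (input 'ab cde' gives []), while B returns it (['cde']), the intended value per the function's documented purpose of extracting terms at least three characters long. — e.g. on filterTerms("abc"): A returns [], B returns ["abc"]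
import Mathlib
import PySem

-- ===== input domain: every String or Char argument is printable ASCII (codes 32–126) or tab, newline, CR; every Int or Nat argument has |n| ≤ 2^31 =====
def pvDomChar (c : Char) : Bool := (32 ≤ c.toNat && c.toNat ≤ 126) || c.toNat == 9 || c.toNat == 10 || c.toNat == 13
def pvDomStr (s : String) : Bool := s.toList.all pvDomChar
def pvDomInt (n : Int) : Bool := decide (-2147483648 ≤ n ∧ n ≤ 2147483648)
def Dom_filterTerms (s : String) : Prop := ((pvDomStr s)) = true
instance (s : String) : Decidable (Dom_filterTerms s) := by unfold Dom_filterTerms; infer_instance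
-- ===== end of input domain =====

-- B replaces A's start-index/slice scan (with its separate, off-by-one trailing flush) by one uniform
-- run-buffer pass; on strings whose trailing alphanumeric run has length exactly 3, A drops the final
-- term and B returns it (the intended value) — see D_filterTerms below.

-- ===== PORT A =====
-- loop body of A: for end in range(len(s)): if not s[end].isalnum(): …
def filterTermsStepA (cs : List Char) (st : List String × Int) (e : Int) : List String × Int :=
  match PySem.List.pyGet? cs e with
  | some c =>
      if ¬ (PySem.Chars.isalnum c) then
        ((if (3 : Int) ≤ e - st.2 then
            st.1 ++ [String.ofList (PySem.Chars.lower (PySem.List.slice cs (some st.2) (some e)))]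
          else st.1), e + 1)
      else st
  | none => st  -- unreachable: e is always a valid index

def filterTerms (s : String) : List String :=
  let cs := s.toList
  if cs.length ≤ 0 then []
  else
    let st := (PySem.List.pyRange 0 (cs.length : Int) 1).foldl (filterTermsStepA cs) ([], 0)
    let endI : Int := (cs.length : Int) - 1
    match PySem.List.pyGet? cs endI with
    | some c =>
        if PySem.Chars.isalnum c then
          if (3 : Int) ≤ endI - st.2 then
            st.1 ++ [String.ofList (PySem.Chars.lower (PySem.List.slice cs (some st.2) (some (endI + 1))))]
          else st.1
        else st.1
    | none => st.1  -- unreachable: s is nonempty here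

-- ===== PORT B =====
-- loop body of B: append alnum chars to the current run, flush the run when it ends
def filterTermsStepB (st : List String × List Char) (c : Char) : List String × List Char :=
  if PySem.Chars.isalnum c then (st.1, st.2 ++ [c])
  else ((if 3 ≤ st.2.length then st.1 ++ [String.ofList (PySem.Chars.lower st.2)] else st.1), [])

def filterTerms_alt (s : String) : List String :=
  let st := s.toList.foldl filterTermsStepB ([], [])
  if 3 ≤ st.2.length then st.1 ++ [String.ofList (PySem.Chars.lower st.2)] else st.1

-- ===== PRECONDITION & SPEC =====
-- On strings whose trailing maximal alphanumeric run has length exactly 3, A's off-by-one trailing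
-- flush (end - start >= 3, but that run's length is end - start + 1) silently drops the final term
-- (input 'ab cde' gives []), while B returns it (['cde']), the intended value per the function's
-- documented purpose of extracting terms at least three characters long.
def D_filterTerms (s : String) : Prop :=
  (s.toList.reverse.takeWhile PySem.Chars.isalnum).length = 3
instance (s : String) : Decidable (D_filterTerms s) := by unfold D_filterTerms; infer_instance

def Spec_filterTerms (s : String) (out : List String) : Prop :=
  ¬ D_filterTerms s → out = filterTerms_alt s
instance (s : String) (out : List String) : Decidable (Spec_filterTerms s out) := by
  unfold Spec_filterTerms; infer_instance

def pvDiffWitness_filterTerms : String := "abc"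
def pvDiffWitnessOut_filterTerms : (List String) × (List String) := ([], ["abc"])

-- ===== CLAIM (what is proved, stated in full; the proofs are below) =====
def Claim_unchanged_filterTerms : Prop :=
  ∀ (s : String), Dom_filterTerms s → Spec_filterTerms s (filterTerms s)
def Claim_changed_filterTerms : Prop :=
  Dom_filterTerms (pvDiffWitness_filterTerms) ∧ D_filterTerms (pvDiffWitness_filterTerms) ∧
  filterTerms (pvDiffWitness_filterTerms) = pvDiffWitnessOut_filterTerms.1 ∧
  filterTerms_alt (pvDiffWitness_filterTerms) = pvDiffWitnessOut_filterTerms.2 ∧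
  pvDiffWitnessOut_filterTerms.1 ≠ pvDiffWitnessOut_filterTerms.2
def Claim_exact_filterTerms : Prop :=
  ∀ (s : String), Dom_filterTerms s → D_filterTerms s → filterTerms s ≠ filterTerms_alt s

-- ===== LEMMAS AND PROOFS =====

theorem tw_len_iff (p : Char → Bool) (t : List Char) :
    ((t.reverse.takeWhile p).length = t.reverse.length) ↔ t.all p := by
  constructor
  · intro h
    have h2 : t.reverse.takeWhile p = t.reverse :=
      (List.takeWhile_prefix p).eq_of_length h
    have := List.takeWhile_eq_self_iff.mp h2
    simp only [List.all_eq_true]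
    intro x hx; exact this x (by simpa using hx)
  · intro h
    rw [List.takeWhile_eq_self_iff.mpr (by intro x hx; exact (List.all_eq_true.mp h) x (by simpa using hx))]


theorem foldl_stepB_run : ∀ (cs : List Char) (terms : List String) (run : List Char),
    (cs.foldl filterTermsStepB (terms, run)).2
      = if cs.all PySem.Chars.isalnum then run ++ cs
        else (cs.reverse.takeWhile PySem.Chars.isalnum).reverse := by
  intro cs
  induction cs with
  | nil => intro terms run; simp
  | cons c t ih =>
    intro terms run
    by_cases hc : PySem.Chars.isalnum c
    · rw [List.foldl_cons, show filterTermsStepB (terms, run) c = (terms, run ++ [c]) by simp [filterTermsStepB, hc], ih]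
      by_cases ht : t.all PySem.Chars.isalnum
      · rw [if_pos ht, if_pos (by simp [ht, hc])]; simp
      · rw [if_neg ht, if_neg (by simp [ht]), List.reverse_cons, List.takeWhile_append,
            if_neg (by rw [tw_len_iff]; exact ht)]
    · have hcf : PySem.Chars.isalnum c = false := by simpa using hc
      rw [List.foldl_cons,
          show filterTermsStepB (terms, run) c
            = ((if 3 ≤ run.length then terms ++ [String.ofList (PySem.Chars.lower run)] else terms),
               ([] : List Char)) by simp [filterTermsStepB, hcf],
          ih]
      by_cases ht : t.all PySem.Chars.isalnum
      · rw [if_pos ht, if_neg (show ¬((c :: t).all PySem.Chars.isalnum = true) by simp [hcf]),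
            List.reverse_cons, List.takeWhile_append, if_pos ((tw_len_iff _ _).mpr ht),
            show List.takeWhile PySem.Chars.isalnum [c] = [] by simp [hcf]]
        simp
      · rw [if_neg ht, if_neg (show ¬((c :: t).all PySem.Chars.isalnum = true) by simp [hcf]),
            List.reverse_cons, List.takeWhile_append, if_neg (by rw [tw_len_iff]; exact ht)]

theorem run_take_succ (cs : List Char) (start i : Nat) (h1 : start ≤ i) (h2 : i < cs.length) :
    (cs.drop start).take (i + 1 - start) = (cs.drop start).take (i - start) ++ [cs[i]] := by
  have h3 : i + 1 - start = (i - start) + 1 := by omega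
  rw [h3, List.take_add_one]
  have he : start + (i - start) = i := by omega
  have h4 : (cs.drop start)[i - start]? = some cs[i] := by
    rw [List.getElem?_drop, he, List.getElem?_eq_getElem h2]
  simp [h4]

theorem loopAB (cs : List Char) : ∀ (k i start : Nat) (terms : List String),
    start ≤ i → i + k = cs.length →
    ∃ start' : Nat, start' ≤ cs.length ∧
      (PySem.List.pyRange (i : Int) (cs.length : Int) 1).foldl (filterTermsStepA cs) (terms, (start : Int))
        = (((cs.drop i).foldl filterTermsStepB (terms, (cs.drop start).take (i - start))).1, (start' : Int)) ∧
      (cs.drop start').take (cs.length - start')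
        = ((cs.drop i).foldl filterTermsStepB (terms, (cs.drop start).take (i - start))).2 := by
  intro k
  induction k with
  | zero =>
    intro i start terms hsi hik
    have hi : i = cs.length := by omega
    refine ⟨start, by omega, ?_, ?_⟩
    · rw [PySem.List.pyRange_one_eq_nil (by omega), hi, List.drop_length]
      simp
    · rw [hi, List.drop_length]
      simp
  | succ k ih =>
    intro i start terms hsi hik
    have hilt : i < cs.length := by omega
    rw [PySem.List.pyRange_one_cons (by exact_mod_cast hilt), List.foldl_cons,
        List.drop_eq_getElem_cons hilt, List.foldl_cons]
    have hget : PySem.List.pyGet? cs (i : Int) = some cs[i] := by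
      rw [PySem.List.pyGet?_natCast, List.getElem?_eq_getElem hilt]
    by_cases hc : PySem.Chars.isalnum cs[i]
    · have hfa : filterTermsStepA cs (terms, (start : Int)) (i : Int) = (terms, (start : Int)) := by
        simp [filterTermsStepA, hget, hc]
      have hgb : filterTermsStepB (terms, (cs.drop start).take (i - start)) cs[i]
          = (terms, (cs.drop start).take (i + 1 - start)) := by
        rw [run_take_succ cs start i hsi hilt]; simp [filterTermsStepB, hc]
      rw [hfa, hgb]
      have := ih (i + 1) start terms (by omega) (by omega)
      rw [show ((i : Int) + 1) = ((i + 1 : Nat) : Int) by push_cast; ring]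
      exact this
    · have hcf : PySem.Chars.isalnum cs[i] = false := by simpa using hc
      have hlen : ((cs.drop start).take (i - start)).length = i - start := by
        simp; omega
      have hcond : ((3 : Int) ≤ (i : Int) - (start : Int))
          ↔ (3 ≤ ((cs.drop start).take (i - start)).length) := by
        rw [hlen]; omega
      have hslice : PySem.List.slice cs (some (start : Int)) (some (i : Int))
          = (cs.drop start).take (i - start) := by
        rw [PySem.List.slice_natCast]
      have hfa : filterTermsStepA cs (terms, (start : Int)) (i : Int)
          = ((if 3 ≤ ((cs.drop start).take (i - start)).length then
                terms ++ [String.ofList (PySem.Chars.lower ((cs.drop start).take (i - start)))]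
              else terms), (i : Int) + 1) := by
        simp only [filterTermsStepA, hget, hcf, Bool.false_eq_true, not_false_eq_true, if_true, hslice]
        congr 1
        split_ifs with h1 h2 h2 <;> first | rfl | (exfalso; omega)
      have hgb : filterTermsStepB (terms, (cs.drop start).take (i - start)) cs[i]
          = ((if 3 ≤ ((cs.drop start).take (i - start)).length then
                terms ++ [String.ofList (PySem.Chars.lower ((cs.drop start).take (i - start)))]
              else terms), ([] : List Char)) := by
        simp [filterTermsStepB, hcf]
      rw [hfa, hgb]
      have h0 : ((cs.drop (i+1)).take ((i+1) - (i+1))) = ([] : List Char) := by simp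
      have := ih (i + 1) (i + 1)
        (if 3 ≤ ((cs.drop start).take (i - start)).length then
            terms ++ [String.ofList (PySem.Chars.lower ((cs.drop start).take (i - start)))]
          else terms) (le_refl _) (by omega)
      rw [h0] at this
      rw [show ((i : Int) + 1) = ((i + 1 : Nat) : Int) by push_cast; ring]
      exact this

theorem final_run (cs : List Char) :
    (cs.foldl filterTermsStepB (([] : List String), ([] : List Char))).2
      = (cs.reverse.takeWhile PySem.Chars.isalnum).reverse := by
  rw [foldl_stepB_run]
  split_ifs with h
  · rw [List.takeWhile_eq_self_iff.mpr
      (by intro x hx; exact (List.all_eq_true.mp h) x (by simpa using hx)),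
      List.reverse_reverse]
    simp
  · rfl

-- both results, plus the disagreement, from one case analysis
theorem key (s : String) :
    (¬ D_filterTerms s → filterTerms s = filterTerms_alt s) ∧
    (D_filterTerms s → filterTerms s ≠ filterTerms_alt s) := by
  by_cases hnil : s.toList = []
  · constructor
    · intro _
      simp [filterTerms, filterTerms_alt, hnil]
    · intro hD
      unfold D_filterTerms at hD
      rw [hnil] at hD
      simp at hD
  · have hn : 1 ≤ s.toList.length := by
      have := List.length_pos_iff.mpr hnil
      omega
    obtain ⟨start', hle, heq, hrun⟩ :=
      loopAB s.toList s.toList.length 0 0 [] (le_refl 0) (by omega)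
    simp only [Nat.cast_zero, Nat.sub_zero, List.drop_zero, List.take_zero] at heq hrun
    have hlastget : PySem.List.pyGet? s.toList ((s.toList.length : Int) - 1)
        = some (s.toList[s.toList.length - 1]'(by omega)) := by
      have hc : ((s.toList.length - 1 : Nat) : Int) = (s.toList.length : Int) - 1 := by omega
      rw [← hc, PySem.List.pyGet?_natCast, List.getElem?_eq_getElem (by omega)]
    have hA : filterTerms s
        = if PySem.Chars.isalnum (s.toList[s.toList.length - 1]'(by omega)) then
            if (3 : Int) ≤ ((s.toList.length : Int) - 1) - (start' : Int) then
              (List.foldl filterTermsStepB ([], []) s.toList).1 ++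
                [String.ofList (PySem.Chars.lower (PySem.List.slice s.toList
                  (some (start' : Int)) (some (((s.toList.length : Int) - 1) + 1))))]
            else (List.foldl filterTermsStepB ([], []) s.toList).1
          else (List.foldl filterTermsStepB ([], []) s.toList).1 := by
      simp only [filterTerms]
      rw [if_neg (by omega), heq, hlastget]
    have hslice : PySem.List.slice s.toList (some (start' : Int))
          (some (((s.toList.length : Int) - 1) + 1))
        = (List.foldl filterTermsStepB ([], []) s.toList).2 := by
      rw [show (((s.toList.length : Int) - 1) + 1) = ((s.toList.length : Nat) : Int) by ring,
          PySem.List.slice_natCast, hrun]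
    have hB : filterTerms_alt s
        = if 3 ≤ (List.foldl filterTermsStepB ([], []) s.toList).2.length then
            (List.foldl filterTermsStepB ([], []) s.toList).1 ++
              [String.ofList (PySem.Chars.lower
                (List.foldl filterTermsStepB ([], []) s.toList).2)]
          else (List.foldl filterTermsStepB ([], []) s.toList).1 := by
      simp only [filterTerms_alt]
    have hRlen : (List.foldl filterTermsStepB ([], []) s.toList).2.length
        = s.toList.length - start' := by
      rw [← hrun]; simp
    have hD : D_filterTerms s
        ↔ (List.foldl filterTermsStepB ([], []) s.toList).2.length = 3 := by
      unfold D_filterTerms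
      rw [final_run, List.length_reverse]
    by_cases hlast : PySem.Chars.isalnum (s.toList[s.toList.length - 1]'(by omega))
    · have hcond : ((3 : Int) ≤ ((s.toList.length : Int) - 1) - (start' : Int))
          ↔ 4 ≤ (List.foldl filterTermsStepB ([], []) s.toList).2.length := by omega
      constructor
      · intro hnD
        rw [hD] at hnD
        rw [hA, if_pos hlast, hslice, hB]
        by_cases h4 : 4 ≤ (List.foldl filterTermsStepB ([], []) s.toList).2.length
        · rw [if_pos (hcond.mpr h4), if_pos (by omega)]
        · rw [if_neg (fun hh => h4 (hcond.mp hh)), if_neg (by omega)]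
      · intro hDh
        rw [hD] at hDh
        rw [hA, if_pos hlast, hslice, hB, if_neg (by omega), if_pos (by omega)]
        intro hcontra
        simpa using congrArg List.length hcontra
    · have hglast : s.toList.getLast hnil = s.toList[s.toList.length - 1]'(by omega) :=
        List.getLast_eq_getElem hnil
      have hRnil : (List.foldl filterTermsStepB ([], []) s.toList).2 = [] := by
        rw [final_run]
        cases hrev : s.toList.reverse with
        | nil => exact absurd (by simpa using congrArg List.reverse hrev) hnil
        | cons a l' =>
          have hne : s.toList.reverse ≠ [] := by simp [hnil]
          have ha : s.toList.getLast hnil = a := by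
            rw [List.getLast_eq_head_reverse]
            have h1 : s.toList.reverse.head? = some a := by rw [hrev]; rfl
            have h2 := List.head?_eq_some_head hne
            rw [h1] at h2
            exact (Option.some.inj h2).symm
          have ha2 : PySem.Chars.isalnum a = false := by
            rw [← ha, hglast]; simpa using hlast
          simp [ha2]
      constructor
      · intro _
        rw [hA, if_neg hlast, hB, if_neg (by simp [hRnil])]
      · intro hDh
        rw [hD, hRnil] at hDh
        simp at hDh

-- ===== VERDICT (by name: the statement is the Claim_ definition above) =====
theorem filterTerms_spec : Claim_unchanged_filterTerms := by
  intro s _ hD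
  exact (key s).1 hD

theorem filterTerms_changed : Claim_changed_filterTerms := by
  unfold Claim_changed_filterTerms; decide

theorem filterTerms_tight : Claim_exact_filterTerms := by
  intro s _ hD
  exact (key s).2 hD
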